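-- pv_equiv track=rewrite | github.com/Adrian-Obungu/AI-governance-assessor | src/modules/assessment/engine.py | apply_user_limitations
-- ===== SOURCE A (Python) =====
-- def apply_user_limitations(framework, limitations):
--     """Apply user question limitations"""
--     if not limitations or "max_questions" not in limitations:
--         return framework
--
--     max_q = limitations["max_questions"]
--     limited = {}
--     count = 0
--
--     for domain, data in framework.items():
--         limited_domain = data.copy()
--         questions = data.get("questions", [])
--
--         if count >= max_q:
--             limited_domain["questions"] = []
--         else:
--             remaining = max_q - count
--             limited_domain["questions"] = questions[:remaining]
--             count += len(limited_domain["questions"])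
--
--         limited[domain] = limited_domain
--
--     return limited
-- ===== SOURCE B (Python) =====
-- def apply_user_limitations(framework, limitations):
--     """Apply user question limitations (prefix-sum formulation)."""
--     if not limitations or "max_questions" not in limitations:
--         return framework
--
--     max_q = limitations["max_questions"]
--
--     # prefix[i] = total number of questions in all domains before domain i
--     prefix = []
--     total = 0
--     for data in framework.values():
--         prefix.append(total)
--         total += len(data.get("questions", []))
--
--     limited = {}
--     for (domain, data), before_full in zip(framework.items(), prefix):
--         limited_domain = data.copy()
--         before = min(max_q, before_full)
--         if before >= max_q:
--             limited_domain["questions"] = []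
--         else:
--             limited_domain["questions"] = data.get("questions", [])[:max_q - before]
--         limited[domain] = limited_domain
--     return limited
-- ===== Notes on version B (the rewrite author's own statement) =====
-- stated objective: alternative
-- what changed: Replaced A's running truncation counter threaded through one loop by a precomputed prefix-sum table of per-domain question counts plus a second zip-driven slicing pass that derives each domain's cutoff as min(max_q, prefix).
import Mathlib
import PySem

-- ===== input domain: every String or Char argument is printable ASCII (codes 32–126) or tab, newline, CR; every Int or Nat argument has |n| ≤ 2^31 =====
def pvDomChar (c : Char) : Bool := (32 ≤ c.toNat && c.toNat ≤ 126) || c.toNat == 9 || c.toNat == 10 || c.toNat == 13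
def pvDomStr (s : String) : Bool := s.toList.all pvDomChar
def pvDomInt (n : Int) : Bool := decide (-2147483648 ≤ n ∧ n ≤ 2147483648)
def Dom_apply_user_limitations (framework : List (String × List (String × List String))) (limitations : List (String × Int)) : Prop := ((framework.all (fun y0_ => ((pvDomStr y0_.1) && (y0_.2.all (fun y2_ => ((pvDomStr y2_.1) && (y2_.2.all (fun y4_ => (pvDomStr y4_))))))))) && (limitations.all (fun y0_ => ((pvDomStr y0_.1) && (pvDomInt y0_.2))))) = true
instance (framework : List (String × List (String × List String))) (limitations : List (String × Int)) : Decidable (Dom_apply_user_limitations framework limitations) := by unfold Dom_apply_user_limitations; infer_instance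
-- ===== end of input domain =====

-- B replaces A's running truncation counter by a precomputed prefix-sum table of
-- question counts and a second, zip-driven slicing pass (objective: alternative).

-- ===== PORT A =====
def apply_user_limitations (framework : List (String × List (String × List String))) (limitations : List (String × Int)) : List (String × List (String × List String)) :=
  if limitations = [] ∨ ¬ (PySem.Dict.mk limitations).contains "max_questions" then
    framework
  else
    let max_q := (PySem.Dict.mk limitations).getD "max_questions" 0
    (framework.foldl
      (fun (st : PySem.Dict String (List (String × List String)) × Int) dd =>
        let data : PySem.Dict String (List String) := PySem.Dict.mk dd.2
        let questions := data.getD "questions" []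
        if st.2 ≥ max_q then
          (st.1.insert dd.1 (data.insert "questions" []).items, st.2)
        else
          let remaining := max_q - st.2
          let limited_domain := data.insert "questions" (PySem.List.slice questions none (some remaining))
          (st.1.insert dd.1 limited_domain.items,
           st.2 + ((limited_domain.getD "questions" []).length : Int)))
      (PySem.Dict.mk [], 0)).1.items

-- ===== PORT B =====
def apply_user_limitations_alt (framework : List (String × List (String × List String))) (limitations : List (String × Int)) : List (String × List (String × List String)) :=
  if limitations = [] ∨ ¬ (PySem.Dict.mk limitations).contains "max_questions" then
    framework
  else
    let max_q := (PySem.Dict.mk limitations).getD "max_questions" 0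
    let prefix_ := (framework.foldl
      (fun (st : List Int × Int) dd =>
        (st.1 ++ [st.2], st.2 + ((((PySem.Dict.mk dd.2).getD "questions" []).length : Nat) : Int)))
      ([], 0)).1
    ((framework.zip prefix_).foldl
      (fun (limited : PySem.Dict String (List (String × List String))) ddp =>
        let data : PySem.Dict String (List String) := PySem.Dict.mk ddp.1.2
        let before := min max_q ddp.2
        let limited_domain :=
          if before ≥ max_q then data.insert "questions" []
          else data.insert "questions"
                 (PySem.List.slice (data.getD "questions" []) none (some (max_q - before)))
        limited.insert ddp.1.1 limited_domain.items)
      (PySem.Dict.mk [])).items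

-- ===== PRECONDITION & SPEC =====
def Spec_apply_user_limitations (framework : List (String × List (String × List String))) (limitations : List (String × Int)) (out : List (String × List (String × List String))) : Prop := out = apply_user_limitations_alt framework limitations
instance (framework : List (String × List (String × List String))) (limitations : List (String × Int)) (out : List (String × List (String × List String))) : Decidable (Spec_apply_user_limitations framework limitations out) := by unfold Spec_apply_user_limitations; infer_instance

-- ===== CLAIM (what is proved, stated in full; the proofs are below) =====
def Claim_equal_apply_user_limitations : Prop := ∀ (framework : List (String × List (String × List String))) (limitations : List (String × Int)), Dom_apply_user_limitations framework limitations → Spec_apply_user_limitations framework limitations (apply_user_limitations framework limitations)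

-- ===== LEMMAS AND PROOFS =====

-- number of questions of one domain entry
def pvQLen (dd : String × List (String × List String)) : Int :=
  (((PySem.Dict.mk dd.2).getD "questions" []).length : Int)

-- B's prefix table, recursively: prefix sums of pvQLen starting at t
def pvPfx (t : Int) : List (String × List (String × List String)) → List Int
  | [] => []
  | dd :: r => t :: pvPfx (t + pvQLen dd) r

theorem pvPfx_build (fw : List (String × List (String × List String))) :
    ∀ (init : List Int) (t : Int),
      (fw.foldl
        (fun (st : List Int × Int) dd =>
          (st.1 ++ [st.2], st.2 + ((((PySem.Dict.mk dd.2).getD "questions" []).length : Nat) : Int)))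
        (init, t)).1 = init ++ pvPfx t fw := by
  induction fw with
  | nil => intro init t; simp [pvPfx]
  | cons dd r ih =>
      intro init t
      simp only [List.foldl_cons, pvPfx]
      rw [ih]
      simp [pvQLen]

theorem slice_len (xs : List String) (m : Int) (hm : 0 ≤ m) :
    ((PySem.List.slice xs none (some m)).length : Int) = min m (xs.length : Int) := by
  obtain ⟨k, rfl⟩ := Int.eq_ofNat_of_zero_le hm
  rw [PySem.List.slice_to_natCast]
  simp [List.length_take]

theorem pv_main (max_q : Int) (fw : List (String × List (String × List String))) :
    ∀ (acc : PySem.Dict String (List (String × List String))) (c p : Int),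
      0 ≤ p → (0 ≤ max_q → c = min max_q p) → (max_q < 0 → c = 0) →
      (fw.foldl
        (fun (st : PySem.Dict String (List (String × List String)) × Int) dd =>
          let data : PySem.Dict String (List String) := PySem.Dict.mk dd.2
          let questions := data.getD "questions" []
          if st.2 ≥ max_q then
            (st.1.insert dd.1 (data.insert "questions" []).items, st.2)
          else
            let remaining := max_q - st.2
            let limited_domain := data.insert "questions" (PySem.List.slice questions none (some remaining))
            (st.1.insert dd.1 limited_domain.items,
             st.2 + ((limited_domain.getD "questions" []).length : Int)))
        (acc, c)).1
      =
      (fw.zip (pvPfx p fw)).foldl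
        (fun (limited : PySem.Dict String (List (String × List String))) ddp =>
          let data : PySem.Dict String (List String) := PySem.Dict.mk ddp.1.2
          let before := min max_q ddp.2
          let limited_domain :=
            if before ≥ max_q then data.insert "questions" []
            else data.insert "questions"
                   (PySem.List.slice (data.getD "questions" []) none (some (max_q - before)))
          limited.insert ddp.1.1 limited_domain.items)
        acc := by
  induction fw with
  | nil => intro acc c p _ _ _; simp [pvPfx]
  | cons dd r ih =>
      intro acc c p hp hpos hneg
      simp only [pvPfx, List.zip_cons_cons, List.foldl_cons]
      rcases lt_or_ge max_q 0 with hmq | hmq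
      · -- max_q < 0 : both branches empty the questions
        have hc : c = 0 := hneg hmq
        have h1 : c ≥ max_q := by omega
        have h2 : min max_q p ≥ max_q := by omega
        simp only [if_pos h1, if_pos h2]
        exact ih _ c (p + pvQLen dd)
          (by have h0 : (0:Int) ≤ pvQLen dd := by unfold pvQLen; positivity
              omega)
          (fun h => absurd h (by omega)) hneg
      · -- 0 ≤ max_q
        have hc : c = min max_q p := hpos hmq
        by_cases hge : c ≥ max_q
        · have hpm : max_q ≤ p := by omega
          have hbe : min max_q p ≥ max_q := by omega
          simp only [if_pos hge, if_pos hbe]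
          apply ih
          · have h0 : (0:Int) ≤ pvQLen dd := by unfold pvQLen; positivity
            omega
          · intro _
            have h0 : (0:Int) ≤ pvQLen dd := by unfold pvQLen; positivity
            omega
          · omega
        · have hcp : c = p := by omega
          have hbe : ¬ (min max_q p ≥ max_q) := by omega
          simp only [if_neg hge, if_neg hbe]
          have hlen : ((PySem.List.slice ((PySem.Dict.mk dd.2).getD "questions" []) none
              (some (max_q - c))).length : Int)
              = min (max_q - c) (((PySem.Dict.mk dd.2).getD "questions" []).length : Int) :=
            slice_len _ _ (by omega)
          have h0 : (0:Int) ≤ pvQLen dd := by unfold pvQLen; positivity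
          rw [show min max_q p = c from by omega]
          refine ih _ (c + ((((PySem.Dict.mk dd.2).insert "questions"
                (PySem.List.slice ((PySem.Dict.mk dd.2).getD "questions" []) none
                  (some (max_q - c)))).getD "questions" []).length : Int)) (p + pvQLen dd) ?_ ?_ ?_
          · omega
          · intro _
            rw [PySem.Dict.getD_insert_self, hlen]
            unfold pvQLen at *
            omega
          · intro h
            exact absurd h (by omega)

theorem apply_user_limitations_spec : Claim_equal_apply_user_limitations := by
  intro framework limitations _
  unfold Spec_apply_user_limitations apply_user_limitations apply_user_limitations_alt
  by_cases hguard : limitations = [] ∨ ¬ (PySem.Dict.mk limitations).contains "max_questions"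
  · rw [if_pos hguard, if_pos hguard]
  · simp only [if_neg hguard]
    rw [pvPfx_build framework [] 0]
    rw [pv_main ((PySem.Dict.mk limitations).getD "max_questions" 0) framework (PySem.Dict.mk []) 0 0
      le_rfl (fun _ => by omega) (fun _ => rfl)]
    rfl
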